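-- pv_equiv track=rewrite | github.com/mryingster/ProjectEuler | problem_059.py | findCipher
-- ===== SOURCE A (Python) =====
-- def isPlainASCII(c):
--     if c > ord("z"): return False
--     if c < ord(" "): return False
--     return True
--
-- def seemsLegit(text):
--     text = text.split(" ")
--     for word in text:
--         if len(word) > 15:
--             return False
--     return True
--
-- def findCipher(inBuffer):
--     # Cipher is 3 letters, so brute force all combinations
--     for A in range(ord('a'), ord('z')):
--         for B in range(ord('a'), ord('z')):
--             for C in range(ord('a'), ord('z')):
--                 cipher = [A, B, C]
--                 outBuffer = ""
--                 bufferSum = 0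
--                 solution = True
--                 # Take 3 letters at a time
--                 for i in range(0, len(inBuffer), 3):
--                     # For each letter, decipher, and see if its plain ascii
--                     for j in range(0, 3):
--                         if i+j < len(inBuffer):
--                             char = int(inBuffer[i+j])^cipher[j]
--                             if isPlainASCII(char) == False:
--                                 solution = False
--                                 break
--                             outBuffer += chr(char)
--                             bufferSum += char
--                     if solution == False: break
--
--                 # If it is plain ascii, take whole paragraph and see if it looks ok-ish
--                 if solution == True and seemsLegit(outBuffer):
--                     return chr(A)+chr(B)+chr(C), outBuffer, bufferSum
-- ===== SOURCE B (Python) =====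
-- # B: solve each of the 3 key columns independently for plain-ASCII validity,
-- # then try only candidate key combinations (in the same a..y order) with seemsLegit.
-- def isPlainASCII(c):
--     if c > ord("z"): return False
--     if c < ord(" "): return False
--     return True
--
-- def seemsLegit(text):
--     text = text.split(" ")
--     for word in text:
--         if len(word) > 15:
--             return False
--     return True
--
-- def candidates(buf, j):
--     # lazy column scan: stops at the first non-ASCII decode
--     return [k for k in range(ord('a'), ord('z'))
--             if all(isPlainASCII(x ^ k) for i, x in enumerate(buf) if i % 3 == j)]
--
-- def decrypt(buf, A, B, C):
--     return [x ^ (A if i % 3 == 0 else B if i % 3 == 1 else C)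
--             for i, x in enumerate(buf)]
--
-- def findCipher(inBuffer):
--     for A in candidates(inBuffer, 0):
--         for B in candidates(inBuffer, 1):
--             for C in candidates(inBuffer, 2):
--                 vals = decrypt(inBuffer, A, B, C)
--                 out = "".join(chr(v) for v in vals)
--                 if seemsLegit(out):
--                     return chr(A) + chr(B) + chr(C), out, sum(vals)
-- ===== Notes on version B (the rewrite author's own statement) =====
-- stated objective: alternative
-- what changed: Instead of brute-forcing all 25^3 key triples against the whole buffer, B solves each of the three key columns independently for plain-ASCII validity (25 keys per column, early-exit scan) and then tests only the candidate key combinations, in the same a..y order, with seemsLegit.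
import Mathlib
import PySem

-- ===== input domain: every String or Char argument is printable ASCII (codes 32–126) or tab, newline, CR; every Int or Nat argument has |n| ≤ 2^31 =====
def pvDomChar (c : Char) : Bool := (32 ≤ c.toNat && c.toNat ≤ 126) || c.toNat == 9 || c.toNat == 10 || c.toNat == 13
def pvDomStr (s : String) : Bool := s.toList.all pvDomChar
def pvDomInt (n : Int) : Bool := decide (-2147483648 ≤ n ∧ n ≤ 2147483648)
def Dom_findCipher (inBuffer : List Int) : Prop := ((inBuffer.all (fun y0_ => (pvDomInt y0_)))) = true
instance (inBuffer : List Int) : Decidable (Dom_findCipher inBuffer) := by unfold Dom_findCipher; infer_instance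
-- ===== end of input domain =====

-- B replaces the 25^3-key brute force by solving each of the 3 key columns independently
-- for plain-ASCII validity and then testing only candidate key combinations (same a..y order).

-- ===== PORT A =====
def isPlainASCII (c : Int) : Bool :=
  if c > 122 then false else if c < 32 then false else true

def seemsLegitLoop : List (List Char) → Bool
  | [] => true
  | w :: ws => if PySem.Chars.len w > 15 then false else seemsLegitLoop ws

def seemsLegit (text : String) : Bool :=
  seemsLegitLoop (PySem.Chars.splitOn text.toList [' '])

-- inner 'for j in range(0, 3)' loop; breaks (solution = false) on a non-ASCII char.
-- Indexing uses pyGetD: exact, because it is evaluated only under the guard i + j < len.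
def jLoop (buf : List Int) (n : Int) (cipher : List Int) (i : Int) :
    List Int → List Char → Int → List Char × Int × Bool
  | [], out, s => (out, s, true)
  | j :: js, out, s =>
    if i + j < n then
      let char := PySem.Int.bxor (PySem.List.pyGetD buf (i + j) 0) (PySem.List.pyGetD cipher j 0)
      if isPlainASCII char == false then (out, s, false)
      else jLoop buf n cipher i js (out ++ [Char.ofNat char.toNat]) (s + char)
    else jLoop buf n cipher i js out s

-- outer 'for i in range(0, len(inBuffer), 3)' loop; breaks when solution is false
def iLoop (buf : List Int) (n : Int) (cipher : List Int) :
    List Int → List Char → Int → List Char × Int × Bool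
  | [], out, s => (out, s, true)
  | i :: is, out, s =>
    let r := jLoop buf n cipher i (PySem.List.pyRange 0 3 1) out s
    if r.2.2 == false then (r.1, r.2.1, false)
    else iLoop buf n cipher is r.1 r.2.1

-- body of the triple key loop for one cipher [A, B, C]
def tryKey (buf : List Int) (a b c : Int) : Option (String × String × Int) :=
  let n : Int := PySem.List.len buf
  let r := iLoop buf n [a, b, c] (PySem.List.pyRange 0 n 3) [] 0
  if r.2.2 == true && seemsLegit (String.ofList r.1) then
    some (String.ofList [Char.ofNat a.toNat, Char.ofNat b.toNat, Char.ofNat c.toNat],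
          String.ofList r.1, r.2.1)
  else none

def findCipher (inBuffer : List Int) : Option (String × String × Int) :=
  (PySem.List.pyRange 97 122 1).findSome? fun A =>
    (PySem.List.pyRange 97 122 1).findSome? fun B =>
      (PySem.List.pyRange 97 122 1).findSome? fun C =>
        tryKey inBuffer A B C

-- ===== PORT B =====
-- lazy per-column scan of Source B inlined: the list of column j's decodable keys
def candidates (buf : List Int) (j : Int) : List Int :=
  (PySem.List.pyRange 97 122 1).filter fun k =>
    ((PySem.List.enumerate buf).filterMap fun ix =>
      if PySem.Int.mod ix.1 3 = j then some ix.2 else none).all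
      fun x => isPlainASCII (PySem.Int.bxor x k)

def decrypt (buf : List Int) (a b c : Int) : List Int :=
  (PySem.List.enumerate buf).map fun ix =>
    PySem.Int.bxor ix.2
      (if PySem.Int.mod ix.1 3 = 0 then a else if PySem.Int.mod ix.1 3 = 1 then b else c)

def findCipher_alt (inBuffer : List Int) : Option (String × String × Int) :=
  (candidates inBuffer 0).findSome? fun A =>
    (candidates inBuffer 1).findSome? fun B =>
      (candidates inBuffer 2).findSome? fun C =>
        let vals := decrypt inBuffer A B C
        let out := PySem.Str.join "" (vals.map fun v => String.ofList [Char.ofNat v.toNat])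
        if seemsLegit out then
          some (String.ofList [Char.ofNat A.toNat, Char.ofNat B.toNat, Char.ofNat C.toNat],
                out, vals.sum)
        else none

-- ===== PRECONDITION & SPEC =====
def Spec_findCipher (inBuffer : List Int) (out : Option (String × String × Int)) : Prop := out = findCipher_alt inBuffer
instance (inBuffer : List Int) (out : Option (String × String × Int)) : Decidable (Spec_findCipher inBuffer out) := by unfold Spec_findCipher; infer_instance

-- ===== CLAIM (what is proved, stated in full; the proofs are below) =====
def Claim_equal_findCipher : Prop := ∀ (inBuffer : List Int), Dom_findCipher inBuffer → Spec_findCipher inBuffer (findCipher inBuffer)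

-- ===== LEMMAS AND PROOFS =====

-- decoded values of a buffer under the rotating 3-byte cipher
def decodeVals (a b c : Int) : List Int → List Int
  | [] => []
  | x :: xs => PySem.Int.bxor x a :: decodeVals b c a xs

def plainAll (vs : List Int) : Bool := vs.all isPlainASCII

def chrI (v : Int) : Char := Char.ofNat v.toNat

def cipAt (a b c r : Int) : Int := if r = 0 then a else if r = 1 then b else c

lemma pyRange3_nil {a b : Int} (h : b ≤ a) : PySem.List.pyRange a b 3 = [] := by
  rw [PySem.List.pyRange_of_pos a b (by norm_num)]
  simp [show ¬ a < b by omega]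

lemma pyRange3_cons {a b : Int} (h : a < b) :
    PySem.List.pyRange a b 3 = a :: PySem.List.pyRange (a + 3) b 3 := by
  rw [PySem.List.pyRange_of_pos a b (by norm_num),
      PySem.List.pyRange_of_pos (a + 3) b (by norm_num)]
  by_cases h3 : a + 3 < b
  · rw [if_pos h, if_pos h3]
    have hcnt : ((b - a + 3 - 1) / 3).toNat = ((b - (a + 3) + 3 - 1) / 3).toNat + 1 := by
      omega
    rw [hcnt, List.range_succ_eq_map, List.map_cons, List.map_map]
    refine congrArg₂ _ (by norm_num) (List.map_congr_left ?_)
    intro k _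
    simp only [Function.comp_apply]
    push_cast
    ring
  · rw [if_pos h, if_neg h3]
    have hcnt : ((b - a + 3 - 1) / 3).toNat = 1 := by omega
    rw [hcnt]
    norm_num

lemma jlist012 : PySem.List.pyRange 0 3 1 = [0, 1, 2] := by decide

lemma pyGetD_eq_getD (xs : List Int) (i : Int) (d : Int) :
    PySem.List.pyGetD xs i d = (PySem.List.pyGet? xs i).getD d := rfl

lemma pyGetD_drop (buf : List Int) (i j : Int) (h0 : 0 ≤ i) (hj : 0 ≤ j) :
    PySem.List.pyGetD buf (i + j) 0 = ((buf.drop i.toNat)[j.toNat]?).getD 0 := by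
  rw [pyGetD_eq_getD, PySem.List.pyGet?_of_nonneg buf (by omega)]
  rw [List.getElem?_drop]
  congr 2
  omega

lemma cip_get0 (a b c : Int) : PySem.List.pyGetD [a, b, c] (0 : Int) 0 = a := by
  simp [PySem.List.pyGetD, PySem.List.pyGet?, PySem.List.pyIdx?]
lemma cip_get1 (a b c : Int) : PySem.List.pyGetD [a, b, c] (1 : Int) 0 = b := by
  simp [PySem.List.pyGetD, PySem.List.pyGet?, PySem.List.pyIdx?]
lemma cip_get2 (a b c : Int) : PySem.List.pyGetD [a, b, c] (2 : Int) 0 = c := by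
  simp [PySem.List.pyGetD, PySem.List.pyGet?, PySem.List.pyIdx?]

lemma decodeVals_chunk (a b c : Int) (xs : List Int) :
    decodeVals a b c xs = decodeVals a b c (xs.take 3) ++ decodeVals a b c (xs.drop 3) := by
  rcases xs with _ | ⟨x, _ | ⟨y, _ | ⟨z, t⟩⟩⟩ <;> simp [decodeVals]

lemma jLoop_chunk (buf : List Int) (a b c i : Int) (out : List Char) (s : Int)
    (h0 : 0 ≤ i) (hi : i < (buf.length : Int)) :
    (plainAll (decodeVals a b c ((buf.drop i.toNat).take 3)) = true →
      jLoop buf (buf.length : Int) [a, b, c] i [0, 1, 2] out s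
        = (out ++ (decodeVals a b c ((buf.drop i.toNat).take 3)).map chrI,
           s + (decodeVals a b c ((buf.drop i.toNat).take 3)).sum, true))
    ∧ (plainAll (decodeVals a b c ((buf.drop i.toNat).take 3)) = false →
      (jLoop buf (buf.length : Int) [a, b, c] i [0, 1, 2] out s).2.2 = false) := by
  have hg0 := pyGetD_drop buf i 0 h0 (by norm_num)
  have hg1 := pyGetD_drop buf i 1 h0 (by norm_num)
  have hg2 := pyGetD_drop buf i 2 h0 (by norm_num)
  have hdl : (buf.drop i.toNat).length = buf.length - i.toNat := List.length_drop
  have him : i.toNat < buf.length := by omega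
  rcases hd : buf.drop i.toNat with _ | ⟨x, xs'⟩
  · exfalso
    have := congrArg List.length hd
    simp [hdl] at this
    omega
  · rcases xs' with _ | ⟨y, ys⟩
    · -- final chunk of one element
      have hlen : buf.length - i.toNat = 1 := by
        have := congrArg List.length hd; simp at this; omega
      have c0 : i + 0 < (buf.length : Int) := by omega
      have c1 : ¬ (i + 1 < (buf.length : Int)) := by omega
      have c2 : ¬ (i + 2 < (buf.length : Int)) := by omega
      rw [hd] at hg0
      simp only [jLoop, c0, c1, c2, if_false, hg0, cip_get0, cip_get1, cip_get2,
        Int.toNat_zero, List.getElem?_cons_zero, Option.getD_some, if_pos]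
      by_cases p0 : isPlainASCII (PySem.Int.bxor x a) = true
      · simp [p0, decodeVals, plainAll, chrI]
      · simp only [Bool.not_eq_true] at p0
        simp [p0, decodeVals, plainAll]
    · rcases ys with _ | ⟨z, zs⟩
      · -- final chunk of two elements
        have hlen : buf.length - i.toNat = 2 := by
          have := congrArg List.length hd; simp at this; omega
        have c0 : i + 0 < (buf.length : Int) := by omega
        have c1 : i + 1 < (buf.length : Int) := by omega
        have c2 : ¬ (i + 2 < (buf.length : Int)) := by omega
        rw [hd] at hg0 hg1
        simp only [jLoop, c0, c1, c2, if_true, if_false, hg0, hg1, cip_get0, cip_get1, cip_get2,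
          Int.toNat_zero, Int.toNat_one, List.getElem?_cons_zero, List.getElem?_cons_succ,
          Option.getD_some]
        by_cases p0 : isPlainASCII (PySem.Int.bxor x a) = true
        · by_cases p1 : isPlainASCII (PySem.Int.bxor y b) = true
          · simp [p0, p1, decodeVals, plainAll, chrI]
            ring
          · simp only [Bool.not_eq_true] at p1
            simp [p0, p1, decodeVals, plainAll]
        · simp only [Bool.not_eq_true] at p0
          simp [p0, decodeVals, plainAll]
      · -- full chunk of three elements
        have hlen : 3 ≤ buf.length - i.toNat := by
          have := congrArg List.length hd; simp at this; omega
        have c0 : i + 0 < (buf.length : Int) := by omega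
        have c1 : i + 1 < (buf.length : Int) := by omega
        have c2 : i + 2 < (buf.length : Int) := by omega
        rw [hd] at hg0 hg1 hg2
        simp only [jLoop, c0, c1, c2, if_true, hg0, hg1, hg2, cip_get0, cip_get1,
          cip_get2, Int.toNat_zero, Int.toNat_one, List.getElem?_cons_zero,
          List.getElem?_cons_succ, Option.getD_some]
        by_cases p0 : isPlainASCII (PySem.Int.bxor x a) = true
        · by_cases p1 : isPlainASCII (PySem.Int.bxor y b) = true
          · by_cases p2 : isPlainASCII (PySem.Int.bxor z c) = true
            · simp [p0, p1, p2, decodeVals, plainAll, chrI]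
              ring
            · simp only [Bool.not_eq_true] at p2
              simp [p0, p1, p2, decodeVals, plainAll]
          · simp only [Bool.not_eq_true] at p1
            simp [p0, p1, decodeVals, plainAll]
        · simp only [Bool.not_eq_true] at p0
          simp [p0, decodeVals, plainAll]

lemma iLoop_spec (buf : List Int) (a b c : Int) :
    ∀ (k : Nat) (i : Int) (out : List Char) (s : Int), 0 ≤ i → buf.length ≤ i.toNat + k →
    (plainAll (decodeVals a b c (buf.drop i.toNat)) = true →
      iLoop buf (buf.length : Int) [a, b, c] (PySem.List.pyRange i (buf.length : Int) 3) out s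
        = (out ++ (decodeVals a b c (buf.drop i.toNat)).map chrI,
           s + (decodeVals a b c (buf.drop i.toNat)).sum, true))
    ∧ (plainAll (decodeVals a b c (buf.drop i.toNat)) = false →
      (iLoop buf (buf.length : Int) [a, b, c] (PySem.List.pyRange i (buf.length : Int) 3) out s).2.2 = false) := by
  intro k
  induction k using Nat.strong_induction_on with
  | _ k ih =>
    intro i out s h0 hk
    by_cases hlt : i < (buf.length : Int)
    · rw [pyRange3_cons hlt]
      have hjl := jLoop_chunk buf a b c i out s h0 hlt
      have hsplit : decodeVals a b c (buf.drop i.toNat)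
          = decodeVals a b c ((buf.drop i.toNat).take 3)
            ++ decodeVals a b c (buf.drop (i + 3).toNat) := by
        rw [decodeVals_chunk a b c (buf.drop i.toNat)]
        congr 2
        rw [List.drop_drop]
        congr 1
        omega
      have hk3 : (if 3 ≤ k then k - 3 else 0) < k := by split_ifs <;> omega
      have hk' : buf.length ≤ (i + 3).toNat + (if 3 ≤ k then k - 3 else 0) := by
        split_ifs <;> omega
      constructor
      · intro hall
        rw [hsplit] at hall
        simp only [plainAll, List.all_append, Bool.and_eq_true] at hall
        have ht : plainAll (decodeVals a b c ((buf.drop i.toNat).take 3)) = true := hall.1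
        have hr : plainAll (decodeVals a b c (buf.drop (i + 3).toNat)) = true := hall.2
        simp only [iLoop, jlist012]
        rw [hjl.1 ht]
        simp only [Bool.true_eq_false, beq_iff_eq, reduceIte]
        rw [(ih _ hk3 (i + 3) (out ++ (decodeVals a b c ((buf.drop i.toNat).take 3)).map chrI)
              (s + (decodeVals a b c ((buf.drop i.toNat).take 3)).sum) (by omega) hk').1 hr]
        rw [hsplit]
        simp [List.map_append, List.sum_append, add_assoc]
      · intro hfail
        rw [hsplit] at hfail
        by_cases ht : plainAll (decodeVals a b c ((buf.drop i.toNat).take 3)) = true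
        · have hr : plainAll (decodeVals a b c (buf.drop (i + 3).toNat)) = false := by
            cases hrv : plainAll (decodeVals a b c (buf.drop (i + 3).toNat)) with
            | false => rfl
            | true =>
              simp only [plainAll] at ht hrv
              simp [plainAll, List.all_append, ht, hrv] at hfail
          simp only [iLoop, jlist012]
          rw [hjl.1 ht]
          simp only [Bool.true_eq_false, beq_iff_eq, reduceIte]
          exact (ih _ hk3 (i + 3) _ _ (by omega) hk').2 hr
        · have ht' : plainAll (decodeVals a b c ((buf.drop i.toNat).take 3)) = false := by
            simpa using ht
          have hr2 := hjl.2 ht'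
          simp only [iLoop, jlist012]
          rw [show ((jLoop buf (↑buf.length) [a, b, c] i [0, 1, 2] out s).2.2 == false)
              = true from by rw [hr2]; rfl]
          simp
    · have hdrop : buf.drop i.toNat = [] := List.drop_eq_nil_of_le (by omega)
      rw [pyRange3_nil (by omega), hdrop]
      constructor
      · intro _; simp [iLoop, decodeVals]
      · intro hfalse; simp [decodeVals, plainAll] at hfalse

lemma mod3_cases (s : Int) :
    PySem.Int.mod s 3 = 0 ∨ PySem.Int.mod s 3 = 1 ∨ PySem.Int.mod s 3 = 2 := by
  have h1 := PySem.Int.mod_nonneg s (b := 3) (by norm_num)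
  have h2 := PySem.Int.mod_lt s (b := 3) (by norm_num)
  omega

lemma decrypt_gen (a b c : Int) :
    ∀ (xs : List Int) (s : Int), 0 ≤ s →
    (PySem.List.enumerate xs s).map (fun ix =>
      PySem.Int.bxor ix.2
        (if PySem.Int.mod ix.1 3 = 0 then a else if PySem.Int.mod ix.1 3 = 1 then b else c))
    = decodeVals (cipAt a b c (PySem.Int.mod s 3)) (cipAt a b c (PySem.Int.mod (s + 1) 3))
        (cipAt a b c (PySem.Int.mod (s + 2) 3)) xs := by
  intro xs
  induction xs with
  | nil => intro s _; simp [PySem.List.enumerate_nil, decodeVals]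
  | cons x xs ih =>
    intro s hs
    rw [PySem.List.enumerate_cons, List.map_cons, decodeVals, ih (s + 1) (by omega)]
    have h3 : PySem.Int.mod (s + 1 + 2) 3 = PySem.Int.mod s 3 := by
      rw [PySem.Int.mod_eq_emod_of_pos (by norm_num), PySem.Int.mod_eq_emod_of_pos (by norm_num)]
      omega
    rw [show s + 1 + 1 = s + 2 by ring, h3]
    refine congrArg₂ _ (congrArg _ ?_) rfl
    rcases mod3_cases s with h | h | h <;> rw [h] <;> simp [cipAt]

lemma decrypt_eq (buf : List Int) (a b c : Int) :
    decrypt buf a b c = decodeVals a b c buf := by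
  have := decrypt_gen a b c buf 0 (by norm_num)
  rw [decrypt]
  rw [this]
  norm_num [cipAt, show PySem.Int.mod 0 3 = 0 from by decide,
    show PySem.Int.mod 1 3 = 1 from by decide, show PySem.Int.mod 2 3 = 2 from by decide]

lemma bool_shuffle0 (p x y z : Bool) : (p && (x && y && z)) = ((p && x) && y && z) := by
  cases p <;> cases x <;> cases y <;> cases z <;> rfl
lemma bool_shuffle1 (p x y z : Bool) : (p && (x && y && z)) = (x && (p && y) && z) := by
  cases p <;> cases x <;> cases y <;> cases z <;> rfl
lemma bool_shuffle2 (p x y z : Bool) : (p && (x && y && z)) = (x && y && (p && z))  := by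
  cases p <;> cases x <;> cases y <;> cases z <;> rfl

lemma valid_gen (a b c : Int) :
    ∀ (xs : List Int) (s : Int), 0 ≤ s →
    plainAll (decodeVals (cipAt a b c (PySem.Int.mod s 3)) (cipAt a b c (PySem.Int.mod (s + 1) 3))
        (cipAt a b c (PySem.Int.mod (s + 2) 3)) xs)
      = (((PySem.List.enumerate xs s).filterMap (fun ix =>
            if PySem.Int.mod ix.1 3 = (0 : Int) then some ix.2 else none)).all
            (fun x => isPlainASCII (PySem.Int.bxor x a)) &&
         ((PySem.List.enumerate xs s).filterMap (fun ix =>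
            if PySem.Int.mod ix.1 3 = (1 : Int) then some ix.2 else none)).all
            (fun x => isPlainASCII (PySem.Int.bxor x b)) &&
         ((PySem.List.enumerate xs s).filterMap (fun ix =>
            if PySem.Int.mod ix.1 3 = (2 : Int) then some ix.2 else none)).all
            (fun x => isPlainASCII (PySem.Int.bxor x c))) := by
  intro xs
  induction xs with
  | nil => intro s _; simp [PySem.List.enumerate_nil, decodeVals, plainAll]
  | cons x xs ih =>
    intro s hs
    have hmod1 : PySem.Int.mod (s + 3) 3 = PySem.Int.mod s 3 := by
      rw [PySem.Int.mod_eq_emod_of_pos (by norm_num), PySem.Int.mod_eq_emod_of_pos (by norm_num)]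
      omega
    have hsucc : ∀ t r : Int, PySem.Int.mod t 3 = r → PySem.Int.mod (t + 1) 3 = (if r = 2 then 0 else r + 1) := by
      intro t r h
      rw [PySem.Int.mod_eq_emod_of_pos (by norm_num)] at h ⊢
      split_ifs <;> omega
    have ihs := ih (s + 1) (by omega)
    rw [show s + 1 + 1 = s + 2 by ring, show s + 1 + 2 = s + 3 by ring, hmod1] at ihs
    rw [PySem.List.enumerate_cons, decodeVals]
    simp only [List.filterMap_cons]
    rcases mod3_cases s with h | h | h
    · have e1 : PySem.Int.mod (s + 1) 3 = 1 := by simpa using hsucc s 0 h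
      have e2 : PySem.Int.mod (s + 2) 3 = 2 := by
        have := hsucc (s + 1) 1 e1; rw [show s + 1 + 1 = s + 2 by ring] at this; simpa using this
      simp only [h, e1, e2, cipAt, plainAll, List.all_cons] at ihs ⊢
      norm_num at ihs ⊢
      rw [ihs]
      exact bool_shuffle0 _ _ _ _
    · have e1 : PySem.Int.mod (s + 1) 3 = 2 := by simpa using hsucc s 1 h
      have e2 : PySem.Int.mod (s + 2) 3 = 0 := by
        have := hsucc (s + 1) 2 e1; rw [show s + 1 + 1 = s + 2 by ring] at this; simpa using this
      simp only [h, e1, e2, cipAt, plainAll, List.all_cons] at ihs ⊢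
      norm_num at ihs ⊢
      rw [ihs]
      exact bool_shuffle1 _ _ _ _
    · have e1 : PySem.Int.mod (s + 1) 3 = 0 := by simpa using hsucc s 2 h
      have e2 : PySem.Int.mod (s + 2) 3 = 1 := by
        have := hsucc (s + 1) 0 e1; rw [show s + 1 + 1 = s + 2 by ring] at this; simpa using this
      simp only [h, e1, e2, cipAt, plainAll, List.all_cons] at ihs ⊢
      norm_num at ihs ⊢
      rw [ihs]
      exact bool_shuffle2 _ _ _ _

lemma valid0 (buf : List Int) (a b c : Int) :
    plainAll (decodeVals a b c buf)
      = (((PySem.List.enumerate buf).filterMap (fun ix =>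
            if PySem.Int.mod ix.1 3 = (0 : Int) then some ix.2 else none)).all
            (fun x => isPlainASCII (PySem.Int.bxor x a)) &&
         ((PySem.List.enumerate buf).filterMap (fun ix =>
            if PySem.Int.mod ix.1 3 = (1 : Int) then some ix.2 else none)).all
            (fun x => isPlainASCII (PySem.Int.bxor x b)) &&
         ((PySem.List.enumerate buf).filterMap (fun ix =>
            if PySem.Int.mod ix.1 3 = (2 : Int) then some ix.2 else none)).all
            (fun x => isPlainASCII (PySem.Int.bxor x c))) := by
  have h := valid_gen a b c buf 0 (by norm_num)
  norm_num [show PySem.Int.mod 1 3 = 1 from by decide, show PySem.Int.mod 2 3 = 2 from by decide,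
            show PySem.Int.mod 0 3 = 0 from by decide, cipAt] at h
  simpa using h

lemma join_singletons (vs : List Int) :
    PySem.Str.join "" (vs.map fun v => String.ofList [Char.ofNat v.toNat])
      = String.ofList (vs.map chrI) := by
  apply String.toList_inj.mp
  rw [PySem.Str.toList_join]
  simp only [List.map_map]
  have : (String.toList ∘ fun v => String.ofList [Char.ofNat v.toNat])
       = (fun cc => [cc]) ∘ chrI := by
    funext v; simp [chrI]
  rw [this, ← List.map_map, show ("".toList : List Char) = [] from rfl,
      PySem.Chars.join_nil_singletons]
  simp

lemma tryKey_eq (buf : List Int) (a b c : Int) :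
    tryKey buf a b c
      = if plainAll (decodeVals a b c buf) then
          (if seemsLegit (String.ofList ((decodeVals a b c buf).map chrI)) then
            some (String.ofList [Char.ofNat a.toNat, Char.ofNat b.toNat, Char.ofNat c.toNat],
                  String.ofList ((decodeVals a b c buf).map chrI), (decodeVals a b c buf).sum)
          else none)
        else none := by
  have h := iLoop_spec buf a b c buf.length 0 [] 0 le_rfl (by simp)
  simp only [Int.toNat_zero, List.drop_zero] at h
  by_cases hall : plainAll (decodeVals a b c buf) = true
  · rw [tryKey]
    simp only [PySem.List.len_eq]
    rw [h.1 hall, if_pos hall]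
    simp
  · have hf : plainAll (decodeVals a b c buf) = false := by simpa using hall
    rw [tryKey]
    simp only [PySem.List.len_eq]
    rw [if_neg hall]
    have h2 := h.2 hf
    simp [h2]

lemma findSome?_congr {α β : Type} (l : List α) (f g : α → Option β)
    (h : ∀ x ∈ l, f x = g x) : l.findSome? f = l.findSome? g := by
  induction l with
  | nil => rfl
  | cons x xs ih =>
    simp only [List.findSome?_cons, h x (by simp)]
    cases g x with
    | none => exact ih (fun y hy => h y (by simp [hy]))
    | some v => rfl

lemma findSome?_filter {α β : Type} (l : List α) (p : α → Bool) (f : α → Option β)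
    (h : ∀ x ∈ l, p x = false → f x = none) :
    l.findSome? f = (l.filter p).findSome? f := by
  induction l with
  | nil => rfl
  | cons x xs ih =>
    by_cases hp : p x = true
    · simp only [List.filter_cons_of_pos hp, List.findSome?_cons]
      cases f x with
      | none => exact ih (fun y hy => h y (by simp [hy]))
      | some v => rfl
    · have hx : f x = none := h x (by simp) (by simpa using hp)
      simp only [List.filter_cons_of_neg (by simpa using hp), List.findSome?_cons, hx]
      exact ih (fun y hy => h y (by simp [hy]))

theorem findCipher_spec : Claim_equal_findCipher := by
  intro buf _
  unfold Spec_findCipher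
  simp only [findCipher, findCipher_alt, candidates]
  set K := PySem.List.pyRange 97 122 1 with hK
  set p0 : Int → Bool := fun k =>
    ((PySem.List.enumerate buf).filterMap fun ix =>
      if PySem.Int.mod ix.1 3 = (0 : Int) then some ix.2 else none).all
      fun x => isPlainASCII (PySem.Int.bxor x k) with hp0
  set p1 : Int → Bool := fun k =>
    ((PySem.List.enumerate buf).filterMap fun ix =>
      if PySem.Int.mod ix.1 3 = (1 : Int) then some ix.2 else none).all
      fun x => isPlainASCII (PySem.Int.bxor x k) with hp1
  set p2 : Int → Bool := fun k =>
    ((PySem.List.enumerate buf).filterMap fun ix =>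
      if PySem.Int.mod ix.1 3 = (2 : Int) then some ix.2 else none).all
      fun x => isPlainASCII (PySem.Int.bxor x k) with hp2
  set G : Int → Int → Int → Option (String × String × Int) := fun A B C =>
    if seemsLegit (String.ofList ((decodeVals A B C buf).map chrI)) then
      some (String.ofList [Char.ofNat A.toNat, Char.ofNat B.toNat, Char.ofNat C.toNat],
            String.ofList ((decodeVals A B C buf).map chrI), (decodeVals A B C buf).sum)
    else none with hG
  have hTK : ∀ A B C : Int, tryKey buf A B C =
      if p0 A && p1 B && p2 C then G A B C else none := by
    intro A B C
    rw [tryKey_eq, valid0, hG, hp0, hp1, hp2]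
  have hC : ∀ A B : Int, List.findSome? (fun C => tryKey buf A B C) K
      = (if p0 A && p1 B then List.findSome? (fun C => G A B C) (K.filter p2) else none) := by
    intro A B
    rw [findSome?_congr K _ _ (fun C _ => hTK A B C)]
    by_cases hab : (p0 A && p1 B) = true
    · rw [if_pos hab]
      rw [findSome?_filter K p2 _ (fun x _ hx => by simp [hx])]
      exact findSome?_congr _ _ _ (fun C hCm => by
        simp [hab, (List.mem_filter.mp hCm).2])
    · rw [if_neg hab]
      simp only [Bool.not_eq_true] at hab
      exact List.findSome?_eq_none_iff.mpr (fun C _ => by simp [hab])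
  have hB : ∀ A : Int, List.findSome?
        (fun B => if p0 A && p1 B then List.findSome? (fun C => G A B C) (K.filter p2) else none) K
      = (if p0 A then List.findSome?
          (fun B => List.findSome? (fun C => G A B C) (K.filter p2)) (K.filter p1) else none) := by
    intro A
    by_cases ha : p0 A = true
    · rw [if_pos ha]
      rw [findSome?_filter K p1 _ (fun x _ hx => by simp [hx])]
      exact findSome?_congr _ _ _ (fun B hBm => by
        simp [ha, (List.mem_filter.mp hBm).2])
    · rw [if_neg ha]
      simp only [Bool.not_eq_true] at ha
      exact List.findSome?_eq_none_iff.mpr (fun B _ => by simp [ha])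
  have hA : List.findSome?
        (fun A => if p0 A then List.findSome?
          (fun B => List.findSome? (fun C => G A B C) (K.filter p2)) (K.filter p1) else none) K
      = List.findSome?
        (fun A => List.findSome?
          (fun B => List.findSome? (fun C => G A B C) (K.filter p2)) (K.filter p1)) (K.filter p0) := by
    rw [findSome?_filter K p0 _ (fun x _ hx => by simp [hx])]
    exact findSome?_congr _ _ _ (fun A hAm => by simp [(List.mem_filter.mp hAm).2])
  calc List.findSome? (fun A => List.findSome?
          (fun B => List.findSome? (fun C => tryKey buf A B C) K) K) K
      = List.findSome? (fun A => List.findSome?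
          (fun B => (if p0 A && p1 B then List.findSome? (fun C => G A B C) (K.filter p2) else none)) K) K :=
        findSome?_congr _ _ _ (fun A _ => findSome?_congr _ _ _ (fun B _ => hC A B))
    _ = List.findSome? (fun A => (if p0 A then List.findSome?
          (fun B => List.findSome? (fun C => G A B C) (K.filter p2)) (K.filter p1) else none)) K :=
        findSome?_congr _ _ _ (fun A _ => hB A)
    _ = List.findSome? (fun A => List.findSome?
          (fun B => List.findSome? (fun C => G A B C) (K.filter p2)) (K.filter p1)) (K.filter p0) := hA
    _ = _ := by
        refine findSome?_congr _ _ _ (fun A _ => ?_)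
        refine findSome?_congr _ _ _ (fun B _ => ?_)
        refine findSome?_congr _ _ _ (fun C _ => ?_)
        rw [hG]
        simp only [decrypt_eq, join_singletons]
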